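-- pv_equiv track=rewrite | github.com/crinas21/python_unix_emulator | nautilus.py | find_leading_paths
-- ===== SOURCE A (Python) =====
-- def find_leading_paths(path:str) -> list:
--     '''
--     Returns a list of all of the leading
--     absolute paths to a specified path
--     '''
--     path_names = path.strip("/").split("/")
--     leading_paths = []
--     i = 0
--     while i < len(path_names)-1:
--         l_path = ''
--         j = 0
--         while j <= i:
--             l_path += "/" + path_names[j]
--             j += 1
--         leading_paths.append(l_path)
--         i += 1
--     leading_paths.insert(0, '/')
--     return leading_paths
-- ===== SOURCE B (Python) =====
-- def find_leading_paths(path:str) -> list: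
--     '''
--     Returns a list of all of the leading
--     absolute paths to a specified path
--     '''
--     names = path.strip("/").split("/")
--     leading_paths = ["/"]
--     prefix = ""
--     for name in names[:-1]:
--         prefix += "/" + name
--         leading_paths.append(prefix)
--     return leading_paths
-- ===== Notes on version B (the rewrite author's own statement) =====
-- stated objective: alternative
-- what changed: Replaced the nested inner loop that rebuilds each leading path from scratch with a single pass that keeps a running prefix string and appends a snapshot per component (quadratic rebuilds removed).
import Mathlib
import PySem

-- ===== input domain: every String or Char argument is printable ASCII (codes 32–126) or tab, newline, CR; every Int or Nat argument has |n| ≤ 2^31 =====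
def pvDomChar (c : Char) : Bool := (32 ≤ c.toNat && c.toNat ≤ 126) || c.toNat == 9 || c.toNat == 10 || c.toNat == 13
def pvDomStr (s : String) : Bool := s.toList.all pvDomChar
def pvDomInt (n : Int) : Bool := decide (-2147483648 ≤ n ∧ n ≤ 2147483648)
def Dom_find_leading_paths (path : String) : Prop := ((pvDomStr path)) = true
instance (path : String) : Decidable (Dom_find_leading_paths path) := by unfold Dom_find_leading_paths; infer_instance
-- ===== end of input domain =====

-- B replaces A's nested inner rebuild of each leading path with a single pass that keeps a
-- running prefix string and snapshots it per component (alternative decomposition).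

-- ===== PORT A =====
def find_leading_paths (path : String) : List String :=
  let path_names := (PySem.Str.split? (PySem.Str.stripChars path "/") "/").getD []
  let leading_paths := (List.range (path_names.length - 1)).foldl
    (fun acc i =>
      let l_path := (List.range (i + 1)).foldl
        (fun l j => l ++ ("/" ++ path_names.getD j "")) ""
      acc ++ [l_path]) []
  PySem.List.insert leading_paths 0 "/"

-- ===== PORT B =====
def find_leading_paths_alt (path : String) : List String :=
  let names := (PySem.Str.split? (PySem.Str.stripChars path "/") "/").getD []
  (names.dropLast.foldl
    (fun (st : List String × String) name =>
      let pfx := st.2 ++ ("/" ++ name)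
      (st.1 ++ [pfx], pfx)) (["/"], "")).1

-- ===== PRECONDITION & SPEC =====
def Spec_find_leading_paths (path : String) (out : List String) : Prop := out = find_leading_paths_alt path
instance (path : String) (out : List String) : Decidable (Spec_find_leading_paths path out) := by unfold Spec_find_leading_paths; infer_instance

-- ===== CLAIM (what is proved, stated in full; the proofs are below) =====
def Claim_equal_find_leading_paths : Prop := ∀ (path : String), Dom_find_leading_paths path → Spec_find_leading_paths path (find_leading_paths path)

-- ===== LEMMAS AND PROOFS =====

-- the list of successive prefixes that B's running accumulator produces, starting from p
def pvSnap (p : String) : List String → List String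
  | [] => []
  | x :: xs => (p ++ ("/" ++ x)) :: pvSnap (p ++ ("/" ++ x)) xs

lemma pvFoldB (l : List String) (acc : List String) (p : String) :
    (l.foldl (fun (st : List String × String) name =>
        (st.1 ++ [st.2 ++ ("/" ++ name)], st.2 ++ ("/" ++ name))) (acc, p))
      = (acc ++ pvSnap p l, l.foldl (fun s name => s ++ ("/" ++ name)) p) := by
  induction l generalizing acc p with
  | nil => simp [pvSnap]
  | cons x xs ih => simp [pvSnap, List.foldl_cons, ih]

lemma pvSnapMap (l : List String) (p : String) :
    (List.range l.length).map
      (fun i => (List.range (i + 1)).foldl (fun s j => s ++ ("/" ++ l.getD j "")) p)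
    = pvSnap p l := by
  induction l generalizing p with
  | nil => simp [pvSnap]
  | cons x xs ih =>
    rw [List.length_cons, List.range_succ_eq_map, List.map_cons, List.map_map]
    simp only [pvSnap]
    congr 1
    rw [← ih (p ++ ("/" ++ x))]
    apply List.map_congr_left
    intro i hi
    simp only [Function.comp_apply]
    rw [List.range_succ_eq_map, List.foldl_cons, List.foldl_map]
    simp

lemma pvGetD_dropLast (l : List String) (j : Nat) (h : j < l.length - 1) :
    l.getD j "" = l.dropLast.getD j "" := by
  have h1 : j < l.dropLast.length := by simpa using h
  have h2 : j < l.length := by omega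
  rw [List.getD_eq_getElem _ _ h2, List.getD_eq_getElem _ _ h1, List.getElem_dropLast]

lemma pvMain (ns : List String) :
    PySem.List.insert
      ((List.range (ns.length - 1)).foldl
        (fun acc i =>
          acc ++ [(List.range (i + 1)).foldl (fun l j => l ++ ("/" ++ ns.getD j "")) ""]) [])
      0 "/"
    = (ns.dropLast.foldl
        (fun (st : List String × String) name =>
          (st.1 ++ [st.2 ++ ("/" ++ name)], st.2 ++ ("/" ++ name))) (["/"], "")).1 := by
  rw [pvFoldB]
  rw [PySem.List.foldl_append_singleton_eq_map]
  have hlen : ns.length - 1 = ns.dropLast.length := by simp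
  have hmap : (List.range (ns.length - 1)).map
      (fun i => (List.range (i + 1)).foldl (fun l j => l ++ ("/" ++ ns.getD j "")) "")
      = (List.range ns.dropLast.length).map
      (fun i => (List.range (i + 1)).foldl (fun l j => l ++ ("/" ++ ns.dropLast.getD j "")) "") := by
    rw [hlen]
    apply List.map_congr_left
    intro i hi
    apply PySem.List.foldl_congr_mem
    intro s j hj
    rw [pvGetD_dropLast]
    have := List.mem_range.mp hi
    have := List.mem_range.mp hj
    omega
  rw [hmap, pvSnapMap]
  exact PySem.List.insert_zero _ _

-- ===== VERDICT (by name: the statement is the Claim_ definition above) =====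
theorem find_leading_paths_spec : Claim_equal_find_leading_paths := by
  intro path _
  unfold Spec_find_leading_paths find_leading_paths find_leading_paths_alt
  exact pvMain _
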